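-- pv_equiv track=rewrite | github.com/hammy275/hamstall | file.py | spaceify
-- ===== SOURCE A (Python) =====
-- def spaceify(file_name):
--     """Adds a backslash before every space for bash"""
--     char_list = []
--     for c in file_name:
--         if c == ' ':
--             char_list.append('\\')
--         char_list.append(c)
--     return_string = ''
--     for i in char_list:
--         return_string = return_string + i
--     return return_string
-- ===== SOURCE B (Python) =====
-- def spaceify(file_name):
--     """Adds a backslash before every space for bash"""
--     return '\\ '.join(file_name.split(' '))
-- ===== Notes on version B (the rewrite author's own statement) =====
-- stated objective: faster
-- what changed: Replaces the character-by-character escape loop plus a second string-concatenation loop with a single token-level split on the space character, rejoined with a backslash-space separator.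
import Mathlib
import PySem

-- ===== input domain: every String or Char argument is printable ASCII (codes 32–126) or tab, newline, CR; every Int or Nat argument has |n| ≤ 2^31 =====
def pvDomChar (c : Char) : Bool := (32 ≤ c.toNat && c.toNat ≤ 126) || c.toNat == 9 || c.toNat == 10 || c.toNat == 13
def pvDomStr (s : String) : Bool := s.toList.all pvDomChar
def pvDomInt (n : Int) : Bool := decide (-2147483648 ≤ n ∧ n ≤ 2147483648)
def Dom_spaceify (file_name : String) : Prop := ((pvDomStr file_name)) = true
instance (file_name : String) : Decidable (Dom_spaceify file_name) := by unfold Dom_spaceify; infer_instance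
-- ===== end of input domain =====

-- B replaces A's char-by-char escape loop + concatenation loop with split(' ') rejoined by '\ ' (idiomatic, same result).


-- ===== PORT A =====
-- first loop: build char_list, appending '\' before each space, then the char itself
-- second loop: concatenate the collected one-char pieces left to right
def spaceify (file_name : String) : String :=
  let char_list : List Char :=
    file_name.toList.foldl (fun acc c => (if c == ' ' then acc ++ ['\\'] else acc) ++ [c]) []
  let return_string : List Char :=
    char_list.foldl (fun rs i => rs ++ [i]) []
  String.ofList return_string

-- ===== PORT B =====
def spaceify_alt (file_name : String) : String :=
  match PySem.Str.split? file_name " " with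
  | some parts => PySem.Str.join "\\ " parts
  | none => ""   -- unreachable: the separator " " is nonempty

-- ===== PRECONDITION & SPEC =====
def Spec_spaceify (file_name : String) (out : String) : Prop := out = spaceify_alt file_name
instance (file_name : String) (out : String) : Decidable (Spec_spaceify file_name out) := by unfold Spec_spaceify; infer_instance

-- ===== CLAIM (what is proved, stated in full; the proofs are below) =====
def Claim_equal_spaceify : Prop := ∀ (file_name : String), Dom_spaceify file_name → Spec_spaceify file_name (spaceify file_name)

-- ===== LEMMAS AND PROOFS =====

/-- A's escape step, char level. -/
def pvEscape : List Char → List Char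
  | [] => []
  | c :: rest => (if c == ' ' then ['\\', c] else [c]) ++ pvEscape rest

/-- Simple recursive single-space split (always returns a nonempty list). -/
def pvSplit : List Char → List (List Char)
  | [] => [[]]
  | c :: rest =>
    if c == ' ' then [] :: pvSplit rest
    else match pvSplit rest with
      | s :: ss => (c :: s) :: ss
      | [] => [[c]]

lemma pvSplit_ne_nil (cs : List Char) : pvSplit cs ≠ [] := by
  cases cs with
  | nil => simp [pvSplit]
  | cons c rest =>
    simp only [pvSplit]
    split
    · simp
    · cases h : pvSplit rest <;> simp

/-- prepend a prefix onto the head segment -/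
def pvConsHead (p : List Char) : List (List Char) → List (List Char)
  | [] => [p]
  | x :: xs => (p ++ x) :: xs

lemma pvConsHead_nil (xs : List (List Char)) (h : xs ≠ []) : pvConsHead [] xs = xs := by
  cases xs with
  | nil => exact absurd rfl h
  | cons x xs => simp [pvConsHead]

lemma pvGo_spec (fuel : Nat) (l cur : List Char) (acc : List (List Char))
    (h : l.length < fuel) :
    PySem.Chars.splitOn.go [' '] fuel l cur acc
      = acc.reverse ++ pvConsHead cur.reverse (pvSplit l) := by
  induction fuel generalizing l cur acc with
  | zero => omega
  | succ fuel ih =>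
    cases l with
    | nil => simp [PySem.Chars.splitOn.go, pvSplit, pvConsHead]
    | cons c rest =>
      by_cases hc : c = ' '
      · subst hc
        have hp : List.isPrefixOf [' '] (' ' :: rest) = true := by
          simp [List.isPrefixOf]
        rw [PySem.Chars.splitOn.go]
        simp only [hp, if_true, List.length_cons, List.drop_succ_cons, List.length_nil, List.drop_zero]
        rw [ih rest [] (cur.reverse :: acc) (by simpa using Nat.lt_of_succ_lt_succ h)]
        cases hs : pvSplit rest with
        | nil => exact absurd hs (pvSplit_ne_nil rest)
        | cons s ss => simp [pvSplit, pvConsHead, hs]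
      · have hp : List.isPrefixOf [' '] (c :: rest) = false := by
          simp [List.isPrefixOf]
          exact fun he => hc he.symm
        rw [PySem.Chars.splitOn.go]
        simp only [hp, Bool.false_eq_true, if_false]
        rw [ih rest (c :: cur) acc (by simpa using Nat.lt_of_succ_lt_succ h)]
        have hcne : (c == ' ') = false := by simpa using hc
        simp only [pvSplit, hcne, Bool.false_eq_true, if_false]
        cases hs : pvSplit rest with
        | nil => exact absurd hs (pvSplit_ne_nil rest)
        | cons s ss => simp [pvConsHead]

lemma splitOn_eq_pvSplit (cs : List Char) :
    PySem.Chars.splitOn cs [' '] = pvSplit cs := by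
  unfold PySem.Chars.splitOn
  rw [pvGo_spec (cs.length + 1) cs [] [] (by omega)]
  simp [pvConsHead_nil _ (pvSplit_ne_nil cs)]

lemma join_pvSplit (cs : List Char) :
    PySem.Chars.join ['\\', ' '] (pvSplit cs) = pvEscape cs := by
  induction cs with
  | nil => simp [pvSplit, pvEscape, PySem.Chars.join, List.intercalate]
  | cons c rest ih =>
    by_cases hc : c = ' '
    · subst hc
      simp only [pvSplit, pvEscape, if_true, beq_self_eq_true]
      rw [← ih]
      cases hs : pvSplit rest with
      | nil => exact absurd hs (pvSplit_ne_nil rest)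
      | cons s ss =>
        simp [PySem.Chars.join, List.intercalate, List.intersperse]
    · have hcne : (c == ' ') = false := by simpa using hc
      simp only [pvSplit, pvEscape, hcne, Bool.false_eq_true, if_false]
      rw [← ih]
      cases hs : pvSplit rest with
      | nil => exact absurd hs (pvSplit_ne_nil rest)
      | cons s ss =>
        cases ss with
        | nil => simp [PySem.Chars.join, List.intercalate, List.intersperse]
        | cons t ts => simp [PySem.Chars.join, List.intercalate, List.intersperse]

lemma foldl_escape (cs : List Char) (acc : List Char) :
    cs.foldl (fun acc c => (if c == ' ' then acc ++ ['\\'] else acc) ++ [c]) acc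
      = acc ++ pvEscape cs := by
  induction cs generalizing acc with
  | nil => simp [pvEscape]
  | cons c rest ih =>
    simp only [List.foldl_cons, pvEscape, ih]
    by_cases hc : c == ' ' <;> simp [hc]

lemma foldl_concat (l acc : List Char) :
    l.foldl (fun rs i => rs ++ [i]) acc = acc ++ l := by
  induction l generalizing acc with
  | nil => simp
  | cons x xs ih => simp [List.foldl_cons, ih]

-- ===== VERDICT (by name: the statement is the Claim_ definition above) =====
theorem spaceify_spec : Claim_equal_spaceify := by
  intro s _
  unfold Spec_spaceify
  have hA : spaceify s = String.ofList (pvEscape s.toList) := by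
    show String.ofList (List.foldl (fun rs i => rs ++ [i]) []
      (List.foldl (fun acc c => (if c == ' ' then acc ++ ['\\'] else acc) ++ [c]) [] s.toList))
        = String.ofList (pvEscape s.toList)
    rw [foldl_concat, foldl_escape]
    simp
  have hB : spaceify_alt s = String.ofList (pvEscape s.toList) := by
    unfold spaceify_alt
    have hsep : (" " : String).toList = [' '] := rfl
    have hjsep : ("\\ " : String).toList = ['\\', ' '] := rfl
    simp only [PySem.Str.split?, PySem.Chars.split?, hsep, List.isEmpty_cons,
      Bool.false_eq_true, if_false, Option.map_some, PySem.Str.join, hjsep]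
    rw [splitOn_eq_pvSplit]
    rw [show List.map String.toList (List.map String.ofList (pvSplit s.toList)) = pvSplit s.toList from by simp [Function.comp_def]]
    rw [join_pvSplit]
  rw [hA, hB]
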